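-- pv_equiv track=rewrite | github.com/KingBaruh/ZeroToHeroPython | level1/recession_demo.py | weigh_str
-- ===== SOURCE A (Python) =====
-- def weigh_str(input_str):
--     if len(input_str) == 1 or len(input_str) == 0:
--         return 0
--     weigh = 0
--     if input_str[0] > input_str[-1]:
--         weigh = 1
--     elif input_str[0] < input_str[-1]:
--         weigh = -1
--     else:
--         weigh = 0
--     return weigh + weigh_str(input_str[1:-1])
-- ===== SOURCE B (Python) =====
-- def weigh_str(input_str):
--     total = 0
--     i, j = 0, len(input_str) - 1
--     while i < j:
--         if input_str[i] > input_str[j]: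
--             total += 1
--         elif input_str[i] < input_str[j]:
--             total -= 1
--         i += 1
--         j -= 1
--     return total
-- ===== Notes on version B (the rewrite author's own statement) =====
-- stated objective: faster
-- what changed: Replaces the recursive end-compare-then-slice-copy (each step copies s[1:-1], O(n^2) total) with a single two-pointer loop over symmetric indices of the original string.
import Mathlib
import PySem

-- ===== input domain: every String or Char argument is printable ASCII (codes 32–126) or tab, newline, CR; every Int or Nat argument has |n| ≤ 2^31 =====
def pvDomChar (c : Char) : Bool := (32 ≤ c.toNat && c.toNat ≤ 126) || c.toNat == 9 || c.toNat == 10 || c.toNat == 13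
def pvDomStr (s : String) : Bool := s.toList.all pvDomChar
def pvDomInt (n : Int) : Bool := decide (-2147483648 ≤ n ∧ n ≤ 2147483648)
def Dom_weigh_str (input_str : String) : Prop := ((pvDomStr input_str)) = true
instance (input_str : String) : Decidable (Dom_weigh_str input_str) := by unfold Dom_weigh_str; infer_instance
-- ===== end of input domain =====

-- B replaces A's end-comparison recursion on a fresh copy s[1:-1] at every step by a
-- single two-pointer loop over symmetric indices of the original string (objective: faster).

-- ===== PORT A =====
-- literal port of A's recursion on the code-point list; the guarded indexings s[0], s[-1]
-- are ported with PySem.List.pyGet? (in range under the guard, so the .getD default is never used)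
def weighStrRecA (l : List Char) : Int :=
  if l.length = 1 ∨ l.length = 0 then 0
  else
    (if (PySem.List.pyGet? l 0).getD ' ' > (PySem.List.pyGet? l (-1)).getD ' ' then (1 : Int)
     else if (PySem.List.pyGet? l 0).getD ' ' < (PySem.List.pyGet? l (-1)).getD ' ' then -1
     else 0)
    + weighStrRecA (PySem.List.slice l (some 1) (some (-1)))
termination_by l.length
decreasing_by
  simp only [PySem.List.length_slice, PySem.List.clampIdx_neg_one]
  have h1 : PySem.List.clampIdx l.length 1 = min 1 l.length := by
    simp
  omega

def weigh_str (input_str : String) : Int := weighStrRecA input_str.toList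

-- ===== PORT B =====
-- literal port of B's while-loop: two indices walking inwards, an Int accumulator
def weighStrGoB (l : List Char) (i j : Nat) (total : Int) : Int :=
  if i < j then
    weighStrGoB l (i + 1) (j - 1)
      (if l[i]! > l[j]! then total + 1
       else if l[i]! < l[j]! then total - 1
       else total)
  else total
termination_by j - i
decreasing_by omega

def weigh_str_alt (input_str : String) : Int :=
  weighStrGoB input_str.toList 0 (input_str.toList.length - 1) 0

-- ===== PRECONDITION & SPEC =====
def Spec_weigh_str (input_str : String) (out : Int) : Prop := out = weigh_str_alt input_str
instance (input_str : String) (out : Int) : Decidable (Spec_weigh_str input_str out) := by unfold Spec_weigh_str; infer_instance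

-- ===== CLAIM (what is proved, stated in full; the proofs are below) =====
def Claim_equal_weigh_str : Prop := ∀ (input_str : String), Dom_weigh_str input_str → Spec_weigh_str input_str (weigh_str input_str)

-- ===== LEMMAS AND PROOFS =====

theorem goB_unfold (l : List Char) (i j : Nat) (t : Int) :
    weighStrGoB l i j t =
      if i < j then
        weighStrGoB l (i + 1) (j - 1)
          (if l[i]! > l[j]! then t + 1 else if l[i]! < l[j]! then t - 1 else t)
      else t := by
  conv_lhs => rw [weighStrGoB]

-- the accumulator of B's loop factors out
theorem goB_acc (l : List Char) (n : Nat) : ∀ (i j : Nat), j - i = n → ∀ (t : Int),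
    weighStrGoB l i j t = t + weighStrGoB l i j 0 := by
  induction n using Nat.strong_induction_on with
  | _ n ih =>
    intro i j hd t
    rw [goB_unfold l i j t, goB_unfold l i j 0]
    by_cases h : i < j
    · simp only [if_pos h]
      rw [ih ((j - 1) - (i + 1)) (by omega) (i + 1) (j - 1) rfl,
          ih ((j - 1) - (i + 1)) (by omega) (i + 1) (j - 1) rfl
            (if l[i]! > l[j]! then (0:Int) + 1 else if l[i]! < l[j]! then 0 - 1 else 0)]
      split_ifs <;> ring
    · simp [h]

-- one unfolding of the loop, with the step already factored out
theorem goB_step (l : List Char) (i j : Nat) (h : i < j) :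
    weighStrGoB l i j 0 =
      (if l[i]! > l[j]! then (1 : Int) else if l[i]! < l[j]! then -1 else 0)
        + weighStrGoB l (i + 1) (j - 1) 0 := by
  rw [goB_unfold]
  simp only [if_pos h]
  rw [goB_acc l ((j - 1) - (i + 1)) (i + 1) (j - 1) rfl]
  split_ifs <;> ring

theorem goB_stop (l : List Char) (i j : Nat) (h : ¬ i < j) :
    weighStrGoB l i j 0 = 0 := by
  rw [goB_unfold]; simp [h]

-- the loop only looks at entries up to j, so it runs the same on the middle slice shifted by one
theorem goB_shift (l m : List Char) (hm : ∀ k, k < m.length → m[k]! = l[k + 1]!) (n : Nat) :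
    ∀ (i j : Nat), j - i = n → (j < m.length ∨ ¬ i < j) →
      weighStrGoB m i j 0 = weighStrGoB l (i + 1) (j + 1) 0 := by
  induction n using Nat.strong_induction_on with
  | _ n ih =>
    intro i j hd hj
    by_cases h : i < j
    · have hjm : j < m.length := by tauto
      rw [goB_step m i j h, goB_step l (i + 1) (j + 1) (by omega)]
      rw [hm i (by omega), hm j hjm]
      have hj1 : (j + 1) - 1 = (j - 1) + 1 := by omega
      rw [hj1, ih ((j - 1) - (i + 1)) (by omega) (i + 1) (j - 1) rfl (by omega)]
    · rw [goB_stop m i j h, goB_stop l (i + 1) (j + 1) (by omega)]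

-- slice l [1:-1] computed as drop/take
theorem slice_middle (l : List Char) (h : 2 ≤ l.length) :
    PySem.List.slice l (some 1) (some (-1)) = (l.drop 1).take (l.length - 2) := by
  simp [PySem.List.slice, PySem.List.clampIdx]
  rw [if_neg (by rintro rfl; simp at h), min_eq_left (by omega)]
  have h1 : ((l.length : Int) + -1).toNat = l.length - 1 := by omega
  rw [h1]
  have h2 : l.length - 1 - 1 = l.length - 2 := by omega
  rw [h2, List.drop_one]

-- the middle entries are the original entries shifted by one
theorem middle_get (l : List Char) (k : Nat)
    (hk : k < ((l.drop 1).take (l.length - 2)).length) :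
    ((l.drop 1).take (l.length - 2))[k]! = l[k + 1]! := by
  have hk2 : k + 1 < l.length := by simp at hk; omega
  rw [getElem!_pos ((l.drop 1).take (l.length - 2)) k hk, getElem!_pos l (k + 1) hk2]
  simp [List.getElem_take]

-- A's s[0] access
theorem pyGet_zero (l : List Char) (h : 2 ≤ l.length) :
    (PySem.List.pyGet? l 0).getD ' ' = l[0]! := by
  have h1 : PySem.List.pyGet? l 0 = l[(0:Nat)]? := by
    simpa using PySem.List.pyGet?_natCast l 0
  rw [h1, getElem!_pos l 0 (by omega)]
  simp [List.getElem?_eq_getElem (show 0 < l.length by omega)]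

-- A's s[-1] access
theorem pyGet_last (l : List Char) (h : 2 ≤ l.length) :
    (PySem.List.pyGet? l (-1)).getD ' ' = l[l.length - 1]! := by
  have h1 : PySem.List.pyGet? l (-1) = l[l.length - 1]? := by
    simp [PySem.List.pyGet?, PySem.List.pyIdx?]
    rw [if_pos (by omega)]; rfl
  rw [h1, getElem!_pos l (l.length - 1) (by omega)]
  simp [List.getElem?_eq_getElem (show l.length - 1 < l.length by omega)]

-- main equivalence on lists
theorem recA_eq_goB (l : List Char) : weighStrRecA l = weighStrGoB l 0 (l.length - 1) 0 := by
  induction hn : l.length using Nat.strong_induction_on generalizing l with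
  | _ n ih =>
  subst hn
  by_cases hbase : l.length = 1 ∨ l.length = 0
  · rw [weighStrRecA]
    simp only [hbase, if_pos]
    rw [goB_stop _ _ _ (by omega)]
  · have hn2 : 2 ≤ l.length := by omega
    rw [weighStrRecA, if_neg hbase]
    set m := PySem.List.slice l (some 1) (some (-1)) with hmdef
    have hm : m = (l.drop 1).take (l.length - 2) := slice_middle l hn2
    have hmlen : m.length = l.length - 2 := by rw [hm]; simp; omega
    have hIH : weighStrRecA m = weighStrGoB m 0 (m.length - 1) 0 :=
      ih m.length (by omega) m rfl
    have hget : ∀ k, k < m.length → m[k]! = l[k + 1]! := by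
      intro k hk; rw [hm]; rw [hm] at hk; exact middle_get l k hk
    rw [pyGet_zero l hn2, pyGet_last l hn2, hIH,
        goB_step l 0 (l.length - 1) (by omega)]
    congr 1
    by_cases hm0 : m.length = 0
    · rw [goB_stop _ _ _ (by omega), goB_stop _ _ _ (by omega)]
    · rw [goB_shift l m hget ((m.length - 1) - 0) 0 (m.length - 1) rfl (Or.inl (by omega))]
      congr 1
      omega

-- ===== VERDICT (by name: the statement is the Claim_ definition above) =====
theorem weigh_str_spec : Claim_equal_weigh_str := by
  intro s _
  unfold Spec_weigh_str weigh_str weigh_str_alt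
  exact recA_eq_goB s.toList
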